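-- pv_equiv track=rewrite | github.com/dvaf-bp/DVAF | BackEnd/database/debian/version.py | deb_ascii_compare
-- ===== SOURCE A (Python) =====
-- def deb_ascii_compare(c1: str, c2: str):
--     min_len = min(len(c1), len(c2))
--
--     for i in range(0, min_len):
--         # tilde is special case
--         c1_tilde = c1[i] == "~"
--         c2_tilde = c2[i] == "~"
--
--         if c1_tilde and not c2_tilde:
--             return -1
--         elif not c1_tilde and c2_tilde:
--             return 1
--
--         if c1[i] < c2[i]:
--             return -1
--         elif c1[i] > c2[i]:
--             return 1
--
--     if len(c1) < len(c2):
--         return -1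
--     elif len(c1) > len(c2):
--         return 1
--     else:
--         return 0
-- ===== SOURCE B (Python) =====
-- def deb_ascii_compare(c1: str, c2: str):
--     k1 = [-1 if ch == "~" else ord(ch) for ch in c1]
--     k2 = [-1 if ch == "~" else ord(ch) for ch in c2]
--     return (k1 > k2) - (k1 < k2)
-- ===== Notes on version B (the rewrite author's own statement) =====
-- stated objective: idiomatic
-- what changed: Replaces the explicit index loop with branch chains by mapping each string to integer sort keys (tilde -> -1, otherwise ord) and letting Python's built-in lexicographic list comparison produce the sign.
import Mathlib
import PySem

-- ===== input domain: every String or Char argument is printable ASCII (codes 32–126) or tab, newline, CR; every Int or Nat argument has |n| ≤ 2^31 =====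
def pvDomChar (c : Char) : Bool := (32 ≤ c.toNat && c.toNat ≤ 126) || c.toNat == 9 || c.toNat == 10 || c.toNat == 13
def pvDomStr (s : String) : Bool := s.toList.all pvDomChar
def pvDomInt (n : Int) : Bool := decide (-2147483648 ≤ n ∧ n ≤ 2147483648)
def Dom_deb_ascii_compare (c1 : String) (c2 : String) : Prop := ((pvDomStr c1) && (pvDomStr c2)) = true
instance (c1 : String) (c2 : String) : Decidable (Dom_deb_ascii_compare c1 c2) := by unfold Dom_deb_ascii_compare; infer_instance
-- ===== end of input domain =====

-- B replaces A's index loop and branch chains by mapping each string to integer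
-- sort keys ('~' ↦ -1, otherwise ord) and comparing the key lists lexicographically (idiomatic).

-- ===== PORT A =====
-- A's for-loop over i < min(len c1, len c2) with early returns, as lockstep
-- recursion over the two character lists; `none` = the loop fell through.
def debLoopA : List Char → List Char → Option Int
  | a :: as, b :: bs =>
    let c1_tilde := a == '~'
    let c2_tilde := b == '~'
    if c1_tilde && !c2_tilde then some (-1)
    else if !c1_tilde && c2_tilde then some 1
    else if a < b then some (-1)
    else if a > b then some 1
    else debLoopA as bs
  | _, _ => none

def deb_ascii_compare (c1 : String) (c2 : String) : Int :=
  match debLoopA c1.toList c2.toList with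
  | some r => r
  | none =>
    if c1.toList.length < c2.toList.length then -1
    else if c1.toList.length > c2.toList.length then 1
    else 0

-- ===== PORT B =====
def debKey (s : List Char) : List Int :=
  s.map (fun ch => if ch == '~' then (-1 : Int) else (ch.toNat : Int))

def deb_ascii_compare_alt (c1 : String) (c2 : String) : Int :=
  let k1 := debKey c1.toList
  let k2 := debKey c2.toList
  (if k2 < k1 then (1 : Int) else 0) - (if k1 < k2 then (1 : Int) else 0)

-- ===== PRECONDITION & SPEC =====
def Spec_deb_ascii_compare (c1 : String) (c2 : String) (out : Int) : Prop := out = deb_ascii_compare_alt c1 c2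
instance (c1 : String) (c2 : String) (out : Int) : Decidable (Spec_deb_ascii_compare c1 c2 out) := by unfold Spec_deb_ascii_compare; infer_instance

-- ===== CLAIM (what is proved, stated in full; the proofs are below) =====
def Claim_equal_deb_ascii_compare : Prop := ∀ (c1 : String) (c2 : String), Dom_deb_ascii_compare c1 c2 → Spec_deb_ascii_compare c1 c2 (deb_ascii_compare c1 c2)

-- ===== LEMMAS AND PROOFS =====

-- the core equivalence, over the character lists
theorem deb_core (xs : List Char) : ∀ ys : List Char,
    (match debLoopA xs ys with
      | some r => r
      | none =>
        if xs.length < ys.length then (-1 : Int)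
        else if xs.length > ys.length then 1
        else 0)
    = (if debKey ys < debKey xs then (1 : Int) else 0)
      - (if debKey xs < debKey ys then (1 : Int) else 0) := by
  induction xs with
  | nil =>
    intro ys
    cases ys with
    | nil => simp [debLoopA, debKey]
    | cons b bs => simp [debLoopA, debKey]
  | cons a as ih =>
    intro ys
    cases ys with
    | nil => simp [debLoopA, debKey]
    | cons b bs =>
      by_cases ha : a = '~' <;> by_cases hb : b = '~'
      · -- both tilde: keys equal, recurse
        subst ha; subst hb
        simpa [debLoopA, debKey, List.cons_lt_cons_iff] using ih bs
      · -- a tilde, b not: A returns -1; key a = -1 < key b = ord b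
        simp [debLoopA, debKey, ha, hb, List.cons_lt_cons_iff]
        try omega
      · -- b tilde, a not
        simp [debLoopA, debKey, ha, hb, List.cons_lt_cons_iff]
        try omega
      · -- neither tilde: char comparison = key comparison
        have hkey : ∀ c d : Char, c < d ↔ ((c.toNat : Int) < (d.toNat : Int)) := by
          intro c d
          simp only [Char.lt_def, UInt32.lt_iff_toNat_lt, Char.toNat]
          exact Int.ofNat_lt.symm
        rcases lt_trichotomy a b with h | h | h
        · have h1 : (a.toNat : Int) < (b.toNat : Int) := (hkey a b).mp h
          have h2 : ¬ b < a := lt_asymm h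
          simp [debLoopA, debKey, ha, hb, h, List.cons_lt_cons_iff, h1]
          omega
        · subst h
          have h2 : ¬ a < a := lt_irrefl a
          simpa [debLoopA, debKey, ha, h2, List.cons_lt_cons_iff] using ih bs
        · have h1 : (b.toNat : Int) < (a.toNat : Int) := (hkey b a).mp h
          have h2 : ¬ a < b := lt_asymm h
          simp [debLoopA, debKey, ha, hb, h, h2, List.cons_lt_cons_iff, h1]
          omega

-- ===== VERDICT (by name: the statement is the Claim_ definition above) =====
theorem deb_ascii_compare_spec : Claim_equal_deb_ascii_compare := by
  intro c1 c2 _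
  unfold Spec_deb_ascii_compare deb_ascii_compare deb_ascii_compare_alt
  exact deb_core c1.toList c2.toList
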